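-- pv_equiv track=rewrite | github.com/przybytniowskaj/KeystrokeDetection | src/utils/data_engineering_utils.py | get_middle_peaks
-- ===== SOURCE A (Python) =====
-- def get_middle_peaks(peaks, max_gap=5):
--     if len(peaks) == 0:
--         return []
--
--     grouped_peaks = []
--     current_group = [peaks[0]]
--
--     for i in range(1, len(peaks)):
--         if peaks[i] - peaks[i - 1] <= max_gap:
--             current_group.append(peaks[i])
--         else:
--             grouped_peaks.append(current_group)
--             current_group = [peaks[i]]
--
--     grouped_peaks.append(current_group)
--     refined_peaks = [group[len(group) // 2] for group in grouped_peaks]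
--     return refined_peaks
-- ===== SOURCE B (Python) =====
-- def get_middle_peaks(peaks, max_gap=5):
--     n = len(peaks)
--     if n == 0:
--         return []
--     bounds = [i for i in range(1, n) if peaks[i] - peaks[i - 1] > max_gap]
--     starts = [0] + bounds
--     ends = bounds + [n]
--     return [peaks[s + (e - s) // 2] for s, e in zip(starts, ends)]
-- ===== Notes on version B (the rewrite author's own statement) =====
-- stated objective: alternative
-- what changed: B replaces A's accumulate-and-flush group building (maintaining the current group list and flushing it at each large gap) by a two-pass boundary decomposition: it first collects the gap boundary indices, pairs them into segment ranges, and indexes each segment's middle element directly, never materialising the group sublists.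
import Mathlib
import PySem

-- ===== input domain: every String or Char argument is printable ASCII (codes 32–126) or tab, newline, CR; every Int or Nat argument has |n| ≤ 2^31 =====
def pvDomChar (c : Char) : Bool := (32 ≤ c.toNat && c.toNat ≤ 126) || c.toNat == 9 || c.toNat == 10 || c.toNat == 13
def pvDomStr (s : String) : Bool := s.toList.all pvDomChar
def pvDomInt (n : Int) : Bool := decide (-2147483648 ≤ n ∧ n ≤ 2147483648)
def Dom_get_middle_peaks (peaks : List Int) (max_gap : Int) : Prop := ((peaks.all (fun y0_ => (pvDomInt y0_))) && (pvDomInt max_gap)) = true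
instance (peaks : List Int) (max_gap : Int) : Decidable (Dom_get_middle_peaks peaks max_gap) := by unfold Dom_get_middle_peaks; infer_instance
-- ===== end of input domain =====

-- B replaces A's accumulate-and-flush group building by a two-pass boundary decomposition
-- (collect gap indices, then index the middles directly); objective: alternative decomposition, same cost.

-- ===== PORT A =====
-- group[len(group) // 2]
def pvMidPy (group : List Int) : Int :=
  PySem.List.pyGetD group (PySem.Int.floordiv (group.length : Int) 2) 0

def get_middle_peaks (peaks : List Int) (max_gap : Int) : List Int :=
  if peaks.length = 0 then []
  else
    let st := (PySem.List.pyRange 1 (peaks.length : Int) 1).foldl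
      (fun (s : List (List Int) × List Int) (i : Int) =>
        if PySem.List.pyGetD peaks i 0 - PySem.List.pyGetD peaks (i - 1) 0 ≤ max_gap
        then (s.1, s.2 ++ [PySem.List.pyGetD peaks i 0])
        else (s.1 ++ [s.2], [PySem.List.pyGetD peaks i 0]))
      ([], [PySem.List.pyGetD peaks 0 0])
    (st.1 ++ [st.2]).map pvMidPy

-- ===== PORT B =====
def get_middle_peaks_alt (peaks : List Int) (max_gap : Int) : List Int :=
  let n : Int := (peaks.length : Int)
  if n = 0 then []
  else
    let bounds := (PySem.List.pyRange 1 n 1).filter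
      (fun i => max_gap < PySem.List.pyGetD peaks i 0 - PySem.List.pyGetD peaks (i - 1) 0)
    let starts := 0 :: bounds
    let ends := bounds ++ [n]
    (starts.zip ends).map
      (fun se => PySem.List.pyGetD peaks (se.1 + PySem.Int.floordiv (se.2 - se.1) 2) 0)

-- ===== PRECONDITION & SPEC =====
def Spec_get_middle_peaks (peaks : List Int) (max_gap : Int) (out : List Int) : Prop := out = get_middle_peaks_alt peaks max_gap
instance (peaks : List Int) (max_gap : Int) (out : List Int) : Decidable (Spec_get_middle_peaks peaks max_gap out) := by unfold Spec_get_middle_peaks; infer_instance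

-- ===== CLAIM (what is proved, stated in full; the proofs are below) =====
def Claim_equal_get_middle_peaks : Prop := ∀ (peaks : List Int) (max_gap : Int), Dom_get_middle_peaks peaks max_gap → Spec_get_middle_peaks peaks max_gap (get_middle_peaks peaks max_gap)

-- ===== LEMMAS AND PROOFS =====

-- Nat-level model shared by both proofs
def pvSlice (p : List Int) (s e : Nat) : List Int := (p.drop s).take (e - s)

def pvBounds (g : Int) (p : List Int) : List Nat :=
  (List.range' 1 (p.length - 1)).filter (fun i => decide (g < p.getD i 0 - p.getD (i - 1) 0))

def pvLastD : List Nat → Nat → Nat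
  | [], s => s
  | c :: b, _ => pvLastD b c

def pvSegInit (s : Nat) : List Nat → List (Nat × Nat)
  | [] => []
  | c :: b => (s, c) :: pvSegInit c b

def pvSegMap (s : Nat) : List Nat → Nat → List (Nat × Nat)
  | [], n => [(s, n)]
  | c :: b, n => (s, c) :: pvSegMap c b n

def pvGroups (g : Int) (p : List Int) : List (List Int) :=
  (pvSegMap 0 (pvBounds g p) p.length).map (fun se => pvSlice p se.1 se.2)

theorem pvSegMap_eq (b : List Nat) : ∀ (s n : Nat),
    pvSegMap s b n = pvSegInit s b ++ [(pvLastD b s, n)] := by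
  induction b with
  | nil => intro s n; simp [pvSegMap, pvSegInit, pvLastD]
  | cons c b ih => intro s n; simp [pvSegMap, pvSegInit, pvLastD, ih c n]

theorem pvSegInit_append (b : List Nat) : ∀ (s c : Nat),
    pvSegInit s (b ++ [c]) = pvSegInit s b ++ [(pvLastD b s, c)] := by
  induction b with
  | nil => intro s c; simp [pvSegInit, pvLastD]
  | cons d b ih => intro s c; simp [pvSegInit, pvLastD, ih d c]

theorem pvZip_segMap (b : List Nat) : ∀ (s n : Nat),
    (s :: b).zip (b ++ [n]) = pvSegMap s b n := by
  induction b with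
  | nil => intro s n; simp [pvSegMap]
  | cons c b ih => intro s n; simp [pvSegMap, List.zip]; exact ih c n

theorem pvSegMap_bounds (b : List Nat) : ∀ (s n : Nat), s < n → (∀ x ∈ b, s < x ∧ x < n) →
    b.Pairwise (· < ·) → ∀ se ∈ pvSegMap s b n, se.1 < se.2 ∧ se.2 ≤ n := by
  induction b with
  | nil =>
    intro s n hsn _ _ se hse
    simp [pvSegMap] at hse; subst hse; exact ⟨hsn, le_refl n⟩
  | cons c b ih =>
    intro s n hsn hmem hpw se hse
    simp only [pvSegMap, List.mem_cons] at hse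
    rcases hse with h | h
    · subst h
      exact ⟨(hmem c (by simp)).1, le_of_lt (hmem c (by simp)).2⟩
    · refine ih c n (hmem c (by simp)).2
        (fun x hx => ⟨(List.pairwise_cons.1 hpw).1 x hx, (hmem x (by simp [hx])).2⟩)
        (List.pairwise_cons.1 hpw).2 se h

theorem pvBounds_mem (g : Int) (p : List Int) (x : Nat) (hx : x ∈ pvBounds g p) :
    1 ≤ x ∧ x < p.length := by
  have := List.mem_of_mem_filter hx
  simp [List.mem_range'] at this
  omega

theorem pvBounds_pairwise (g : Int) (p : List Int) : (pvBounds g p).Pairwise (· < ·) := by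
  exact List.Pairwise.filter _ ((List.sortedLT_range' 1 (p.length - 1) (s := 1) (by omega)).pairwise)

-- pyGetD on an in-range index of an appended list
theorem pvGetD_append_left (q : List Int) (y : Int) (i : Int) (h0 : 0 ≤ i) (h : i < (q.length : Int)) :
    PySem.List.pyGetD (q ++ [y]) i 0 = PySem.List.pyGetD q i 0 := by
  rw [PySem.List.pyGetD_eq_getElem (q ++ [y]) 0 h0 (by simp; omega),
      PySem.List.pyGetD_eq_getElem q 0 h0 h]
  exact List.getElem_append_left (by omega)

theorem pvLastD_or (b : List Nat) : ∀ s, pvLastD b s = s ∨ pvLastD b s ∈ b := by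
  induction b with
  | nil => intro s; simp [pvLastD]
  | cons c b ih =>
    intro s
    right
    have hstep : pvLastD (c :: b) s = pvLastD b c := rfl
    rcases ih c with h | h
    · rw [hstep, h]; exact List.mem_cons_self
    · rw [hstep]; exact List.mem_cons_of_mem c h

theorem pvLastD_concat (b : List Nat) : ∀ (s c : Nat), pvLastD (b ++ [c]) s = c := by
  induction b with
  | nil => intro s c; simp [pvLastD]
  | cons d b ih => intro s c; simpa [pvLastD] using ih d c

theorem pvSegInit_mem (b : List Nat) : ∀ (s : Nat), ∀ se ∈ pvSegInit s b,
    (se.1 = s ∨ se.1 ∈ b) ∧ se.2 ∈ b := by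
  induction b with
  | nil => intro s se hse; simp [pvSegInit] at hse
  | cons c b ih =>
    intro s se hse
    simp only [pvSegInit, List.mem_cons] at hse
    rcases hse with h | h
    · subst h; simp
    · rcases ih c se h with ⟨h1 | h1, h2⟩
      · exact ⟨Or.inr (by simp [h1]), by simp [h2]⟩
      · exact ⟨Or.inr (by simp [h1]), by simp [h2]⟩

theorem pvSlice_append_left (q : List Int) (y : Int) (s e : Nat) (he : e ≤ q.length) :
    pvSlice (q ++ [y]) s e = pvSlice q s e := by
  by_cases hs : s ≤ q.length
  · unfold pvSlice
    rw [List.drop_append_of_le_length hs,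
        List.take_append_of_le_length (by simp [List.length_drop]; omega)]
  · have h1 : e - s = 0 := by omega
    simp [pvSlice, h1]

theorem pvSlice_last_append (q : List Int) (y : Int) (s : Nat) (hs : s ≤ q.length) :
    pvSlice (q ++ [y]) s (q.length + 1) = pvSlice q s q.length ++ [y] := by
  unfold pvSlice
  rw [List.drop_append_of_le_length hs]
  rw [List.take_of_length_le (by simp [List.length_drop]; omega),
      List.take_of_length_le (by simp [List.length_drop])]

theorem pvSlice_singleton (q : List Int) (y : Int) :
    pvSlice (q ++ [y]) q.length (q.length + 1) = [y] := by
  unfold pvSlice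
  rw [List.drop_append_of_le_length le_rfl, List.drop_length]
  simp

theorem pvBounds_append (g : Int) (q : List Int) (y : Int) (hq : q ≠ []) :
    pvBounds g (q ++ [y]) =
      pvBounds g q ++ (if g < y - q.getD (q.length - 1) 0 then [q.length] else []) := by
  have hnq1 : 1 ≤ q.length := List.length_pos_iff.2 hq
  unfold pvBounds
  rw [show (q ++ [y]).length - 1 = (q.length - 1) + 1 by simp; omega]
  rw [List.range'_1_concat, List.filter_append]
  congr 1
  · apply List.filter_congr
    intro i hi
    rw [List.mem_range'_1] at hi
    rw [List.getD_append _ _ _ _ (by omega), List.getD_append _ _ _ _ (by omega)]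
  · rw [show 1 + (q.length - 1) = q.length by omega]
    have hy : (q ++ [y]).getD q.length 0 = y := by
      rw [List.getD_append_right q [y] 0 q.length le_rfl]; simp
    have hy' : (q ++ [y]).getD (q.length - 1) 0 = q.getD (q.length - 1) 0 :=
      List.getD_append _ _ _ _ (by omega)
    simp only [List.filter_cons, List.filter_nil, hy, hy']
    by_cases hgap : g < y - q.getD (q.length - 1) 0
    · rw [if_pos hgap, decide_eq_true hgap]; simp
    · rw [if_neg hgap, decide_eq_false hgap]; simp

-- A's loop state, named so the induction can speak about it
def pvBodyA (g : Int) (p : List Int) (s : List (List Int) × List Int) (i : Int) :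
    List (List Int) × List Int :=
  if PySem.List.pyGetD p i 0 - PySem.List.pyGetD p (i - 1) 0 ≤ g
  then (s.1, s.2 ++ [PySem.List.pyGetD p i 0])
  else (s.1 ++ [s.2], [PySem.List.pyGetD p i 0])

def pvFoldA (g : Int) (p : List Int) : List (List Int) × List Int :=
  (PySem.List.pyRange 1 (p.length : Int) 1).foldl (pvBodyA g p)
    ([], [PySem.List.pyGetD p 0 0])

theorem pvFoldA_prefix (g : Int) (q : List Int) (y : Int) (hq : q ≠ []) :
    (PySem.List.pyRange 1 (q.length : Int) 1).foldl (pvBodyA g (q ++ [y]))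
      ([], [PySem.List.pyGetD (q ++ [y]) 0 0]) = pvFoldA g q := by
  have hnq1 : 1 ≤ q.length := List.length_pos_iff.2 hq
  unfold pvFoldA
  rw [pvGetD_append_left q y 0 le_rfl (by exact_mod_cast hnq1)]
  apply PySem.List.foldl_congr_mem
  intro acc i hi
  rw [PySem.List.mem_pyRange_one] at hi
  unfold pvBodyA
  rw [pvGetD_append_left q y i (by omega) hi.2,
      pvGetD_append_left q y (i - 1) (by omega) (by omega)]

theorem pvFoldA_step (g : Int) (q : List Int) (y : Int) (hq : q ≠ []) :
    pvFoldA g (q ++ [y]) =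
      if y - q.getD (q.length - 1) 0 ≤ g
      then ((pvFoldA g q).1, (pvFoldA g q).2 ++ [y])
      else ((pvFoldA g q).1 ++ [(pvFoldA g q).2], [y]) := by
  have hnq1 : 1 ≤ q.length := List.length_pos_iff.2 hq
  unfold pvFoldA
  rw [show ((q ++ [y]).length : Int) = (q.length : Int) + 1 by simp]
  rw [PySem.List.pyRange_one_succ_right (by exact_mod_cast hnq1), List.foldl_append]
  rw [show (PySem.List.pyRange 1 (q.length : Int) 1).foldl (pvBodyA g (q ++ [y]))
        ([], [PySem.List.pyGetD (q ++ [y]) 0 0]) = pvFoldA g q from pvFoldA_prefix g q y hq]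
  simp only [List.foldl_cons, List.foldl_nil]
  unfold pvBodyA
  have e1 : PySem.List.pyGetD (q ++ [y]) ((q.length : Nat) : Int) 0 = y := by
    rw [PySem.List.pyGetD_natCast, List.getD_append_right q [y] 0 q.length le_rfl]; simp
  have e2 : PySem.List.pyGetD (q ++ [y]) (((q.length : Nat) : Int) - 1) 0 = q.getD (q.length - 1) 0 := by
    rw [show (((q.length : Nat) : Int) - 1) = ((q.length - 1 : Nat) : Int) by push_cast [hnq1]; omega]
    rw [PySem.List.pyGetD_natCast]
    exact List.getD_append _ _ _ _ (by omega)
  rw [e1, e2]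
  rfl

-- A's fold produces exactly the canonical groups
theorem pvStA_groups (g : Int) (p : List Int) (hp : p ≠ []) :
    (pvFoldA g p).1 ++ [(pvFoldA g p).2] = pvGroups g p := by
  induction p using List.reverseRecOn with
  | nil => exact absurd rfl hp
  | append_singleton q y ih =>
    by_cases hq : q = []
    · subst hq
      simp only [List.nil_append]
      rw [show pvFoldA g [y] = ([], [y]) by
        unfold pvFoldA
        rw [show (([y] : List Int).length : Int) = 1 by simp]
        rw [PySem.List.pyRange_one_eq_nil le_rfl]
        simp [PySem.List.pyGetD_zero_cons]]
      simp [pvGroups, pvBounds, pvSegMap, pvSlice]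
    · have hg := ih hq
      have hnq1 : 1 ≤ q.length := List.length_pos_iff.2 hq
      have hbmem : ∀ x ∈ pvBounds g q, 1 ≤ x ∧ x < q.length :=
        fun x hx => pvBounds_mem g q x hx
      have hsl : pvLastD (pvBounds g q) 0 ≤ q.length := by
        rcases pvLastD_or (pvBounds g q) 0 with h | h
        · omega
        · exact le_of_lt (hbmem _ h).2
      have hgq : pvGroups g q =
          (pvSegInit 0 (pvBounds g q)).map (fun se => pvSlice q se.1 se.2)
            ++ [pvSlice q (pvLastD (pvBounds g q) 0) q.length] := by
        unfold pvGroups; rw [pvSegMap_eq]; simp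
      have hinit : ∀ se ∈ pvSegInit 0 (pvBounds g q),
          pvSlice (q ++ [y]) se.1 se.2 = pvSlice q se.1 se.2 := by
        intro se hse
        exact pvSlice_append_left q y se.1 se.2
          (le_of_lt (hbmem _ (pvSegInit_mem (pvBounds g q) 0 se hse).2).2)
      have hsplit : (pvFoldA g q).1 =
            (pvSegInit 0 (pvBounds g q)).map (fun se => pvSlice q se.1 se.2)
          ∧ (pvFoldA g q).2 = pvSlice q (pvLastD (pvBounds g q) 0) q.length := by
        have h := hg.trans hgq
        simpa using List.concat_inj.1 (by simpa [List.concat_eq_append] using h)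
      rw [pvFoldA_step g q y hq]
      unfold pvGroups
      rw [pvBounds_append g q y hq]
      rw [show (q ++ [y]).length = q.length + 1 by simp]
      by_cases hgap : y - q.getD (q.length - 1) 0 ≤ g
      · rw [if_pos hgap, if_neg (not_lt.2 hgap), List.append_nil]
        rw [pvSegMap_eq, List.map_append]
        rw [List.map_congr_left hinit]
        simp only [List.map_cons, List.map_nil]
        rw [pvSlice_last_append q y _ hsl]
        rw [hsplit.1, hsplit.2]
      · rw [if_neg hgap, if_pos (not_le.1 hgap)]
        rw [pvSegMap_eq, pvLastD_concat, pvSegInit_append, List.map_append, List.map_append]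
        rw [List.map_congr_left hinit]
        simp only [List.map_cons, List.map_nil]
        rw [show pvSlice (q ++ [y]) (pvLastD (pvBounds g q) 0) q.length
              = pvSlice q (pvLastD (pvBounds g q) 0) q.length from
            pvSlice_append_left q y _ _ le_rfl]
        rw [pvSlice_singleton q y]
        rw [hsplit.1, hsplit.2]

-- the middle of a group, Nat level
theorem pvMid_eq (gr : List Int) : pvMidPy gr = gr.getD (gr.length / 2) 0 := by
  unfold pvMidPy
  have h : PySem.Int.floordiv ((gr.length : Nat) : Int) 2 = (((gr.length / 2 : Nat)) : Int) := by
    exact_mod_cast PySem.Int.floordiv_natCast gr.length 2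
  rw [h, PySem.List.pyGetD_natCast]

theorem pvMid_slice (p : List Int) (s e : Nat) (hse : s < e) (hen : e ≤ p.length) :
    p.getD (s + (e - s) / 2) 0 = (pvSlice p s e).getD ((pvSlice p s e).length / 2) 0 := by
  have hlen : (pvSlice p s e).length = e - s := by
    simp only [pvSlice, List.length_take, List.length_drop]; omega
  have hk : (e - s) / 2 < e - s := Nat.div_lt_self (by omega) (by omega)
  rw [hlen, List.getD_eq_getElem _ _ (by omega), List.getD_eq_getElem _ _ (by omega)]
  show p[s + (e - s) / 2]'_ = ((p.drop s).take (e - s))[(e - s) / 2]'_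
  rw [List.getElem_take, List.getElem_drop]

-- B's Int computation equals the Nat-level segment middles
theorem pvB_eq (g : Int) (p : List Int) (hp : p ≠ []) :
    get_middle_peaks_alt p g
      = (pvSegMap 0 (pvBounds g p) p.length).map (fun se => p.getD (se.1 + (se.2 - se.1) / 2) 0) := by
  have hnq1 : 1 ≤ p.length := List.length_pos_iff.2 hp
  unfold get_middle_peaks_alt
  rw [if_neg (by simp [hp])]
  have hbounds : (PySem.List.pyRange 1 ((p.length : Nat) : Int) 1).filter
      (fun i => decide (g < PySem.List.pyGetD p i 0 - PySem.List.pyGetD p (i - 1) 0))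
      = (pvBounds g p).map (Nat.cast : Nat → Int) := by
    rw [PySem.List.pyRange_one]
    rw [show (((p.length : Nat) : Int) - 1).toNat = p.length - 1 by omega]
    rw [List.filter_map]
    unfold pvBounds
    rw [List.range'_eq_map_range, List.filter_map, List.map_map]
    simp only [Function.comp_def]
    rw [List.filter_congr (l := List.range (p.length - 1))
      (q := fun x => decide (g < p.getD (1 + x) 0 - p.getD (1 + x - 1) 0))
      (by
        intro k _
        rw [show (1 : Int) + (k : Int) - 1 = (((1 + k - 1 : Nat)) : Int) by omega,
            show (1 : Int) + (k : Int) = (((1 + k : Nat)) : Int) by omega]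
        rw [PySem.List.pyGetD_natCast, PySem.List.pyGetD_natCast])]
    apply List.map_congr_left
    intro k _
    push_cast
    ring
  show (((0 : Int) :: (PySem.List.pyRange 1 ((p.length : Nat) : Int) 1).filter
          (fun i => decide (g < PySem.List.pyGetD p i 0 - PySem.List.pyGetD p (i - 1) 0))).zip
        ((PySem.List.pyRange 1 ((p.length : Nat) : Int) 1).filter
          (fun i => decide (g < PySem.List.pyGetD p i 0 - PySem.List.pyGetD p (i - 1) 0))
          ++ [((p.length : Nat) : Int)])).map
      (fun se => PySem.List.pyGetD p (se.1 + PySem.Int.floordiv (se.2 - se.1) 2) 0)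
    = (pvSegMap 0 (pvBounds g p) p.length).map (fun se => p.getD (se.1 + (se.2 - se.1) / 2) 0)
  rw [hbounds]
  rw [show ((0 : Int) :: (pvBounds g p).map (Nat.cast : Nat → Int))
        = ((0 :: pvBounds g p).map (Nat.cast : Nat → Int)) from rfl]
  rw [show ((pvBounds g p).map (Nat.cast : Nat → Int) ++ [((p.length : Nat) : Int)])
        = ((pvBounds g p ++ [p.length]).map (Nat.cast : Nat → Int)) by simp]
  rw [List.zip_map, pvZip_segMap, List.map_map]
  apply List.map_congr_left
  intro se hse
  have hb := pvSegMap_bounds (pvBounds g p) 0 p.length (by omega)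
    (fun x hx => ⟨by have := pvBounds_mem g p x hx; omega, (pvBounds_mem g p x hx).2⟩)
    (pvBounds_pairwise g p) se hse
  simp only [Function.comp_def, Prod.map]
  rw [show ((se.2 : Int) - (se.1 : Int)) = (((se.2 - se.1 : Nat)) : Int) by
    have := hb.1; omega]
  rw [show PySem.Int.floordiv (((se.2 - se.1 : Nat)) : Int) 2 = (((se.2 - se.1) / 2 : Nat) : Int) from
    by exact_mod_cast PySem.Int.floordiv_natCast (se.2 - se.1) 2]
  rw [show ((se.1 : Int) + (((se.2 - se.1) / 2 : Nat) : Int)) = (((se.1 + (se.2 - se.1) / 2 : Nat)) : Int) by push_cast; ring]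
  rw [PySem.List.pyGetD_natCast]

-- ===== VERDICT (by name: the statement is the Claim_ definition above) =====
theorem get_middle_peaks_spec : Claim_equal_get_middle_peaks := by
  intro peaks max_gap _
  unfold Spec_get_middle_peaks
  by_cases hp : peaks = []
  · subst hp; simp [get_middle_peaks, get_middle_peaks_alt]
  · have hA : get_middle_peaks peaks max_gap = (pvGroups max_gap peaks).map pvMidPy := by
      unfold get_middle_peaks
      rw [if_neg (by simp [hp])]
      exact congrArg (List.map pvMidPy) (pvStA_groups max_gap peaks hp)
    rw [hA, pvB_eq max_gap peaks hp]
    unfold pvGroups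
    rw [List.map_map]
    apply List.map_congr_left
    intro se hse
    have hb := pvSegMap_bounds (pvBounds max_gap peaks) 0 peaks.length
      (by cases peaks <;> simp_all)
      (fun x hx => ⟨by have := pvBounds_mem max_gap peaks x hx; omega,
                    (pvBounds_mem max_gap peaks x hx).2⟩)
      (pvBounds_pairwise max_gap peaks) se hse
    simp only [Function.comp]
    rw [pvMid_eq, ← pvMid_slice peaks se.1 se.2 hb.1 hb.2]
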